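-- pv_equiv track=rewrite | github.com/dpkp/kafka-python | kafka/benchmarks/varint_speed.py | encode_varint_5
-- ===== SOURCE A (Python) =====
-- def encode_varint_5(value, buf, pos=0):
--     value = (value << 1) ^ (value >> 63)
--
--     bits = value & 0x7f
--     value >>= 7
--     while value:
--         buf[pos] = 0x80 | bits
--         bits = value & 0x7f
--         value >>= 7
--         pos += 1
--     buf[pos] = bits
--     return pos + 1
-- ===== SOURCE B (Python) =====
-- def encode_varint_5(value, buf, pos=0):
--     value = (value << 1) ^ (value >> 63)
--     nbytes = max(1, (value.bit_length() + 6) // 7)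
--     for i in range(nbytes):
--         b = (value >> (7 * i)) & 0x7f
--         if i != nbytes - 1:
--             b |= 0x80
--         buf[pos + i] = b
--     return pos + nbytes
-- ===== Notes on version B (the rewrite author's own statement) =====
-- stated objective: alternative
-- what changed: B computes the output byte count in closed form from the zigzagged value's bit_length and writes the bytes in one index-based for-loop, instead of A's shift-until-zero while-loop with a carried pending byte.
import Mathlib
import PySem

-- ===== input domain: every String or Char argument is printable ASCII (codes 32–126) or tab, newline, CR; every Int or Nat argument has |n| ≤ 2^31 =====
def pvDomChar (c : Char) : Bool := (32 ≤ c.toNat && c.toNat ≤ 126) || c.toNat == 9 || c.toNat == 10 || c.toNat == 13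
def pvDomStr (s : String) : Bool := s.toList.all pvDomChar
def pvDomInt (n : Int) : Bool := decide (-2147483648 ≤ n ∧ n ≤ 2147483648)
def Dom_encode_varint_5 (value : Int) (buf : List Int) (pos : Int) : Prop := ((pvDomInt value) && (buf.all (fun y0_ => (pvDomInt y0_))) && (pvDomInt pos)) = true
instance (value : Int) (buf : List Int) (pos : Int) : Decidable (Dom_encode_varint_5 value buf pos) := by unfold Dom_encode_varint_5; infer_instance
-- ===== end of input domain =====

-- B replaces A's shift-until-zero while-loop (with a carried pending byte) by a closed-form
-- byte count from bit_length plus one index-based write loop; equivalence is about the RETURN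
-- value only (both Pythons also mutate buf in place, identically; the writes do not affect the
-- returned value and are not modeled in the ports).

-- ===== PORT A =====
-- the loop of A: state (value, bits, pos); `buf[pos] = 0x80 | bits` only mutates buf and does
-- not affect the return value, so it is dropped.  Python's `while value:` diverges when
-- value < 0 (no return value exists there), so the port loops only while 0 < value.
def encLoopA (value bits pos : Int) : Int :=
  if h : 0 < value then
    encLoopA (value >>> (7:Nat)) (PySem.Int.band value 0x7f) (pos + 1)
  else
    -- buf[pos] = bits; return pos + 1
    pos + 1
termination_by value.toNat
decreasing_by
  simp only [Int.shiftRight_eq_div_pow]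
  omega

def encode_varint_5 (value : Int) (buf : List Int) (pos : Int) : Int :=
  let value := PySem.Int.bxor (value <<< (1:Nat)) (value >>> (63:Nat))
  let bits := PySem.Int.band value 0x7f
  encLoopA (value >>> (7:Nat)) bits pos

-- ===== PORT B =====
-- the for-loop of Source B only writes bytes into buf; the returned value pos + nbytes does not
-- depend on it, so it is not modeled (see header note).
def encode_varint_5_alt (value : Int) (buf : List Int) (pos : Int) : Int :=
  let value := PySem.Int.bxor (value <<< (1:Nat)) (value >>> (63:Nat))
  let nbytes : Int := ((max 1 ((PySem.Int.bitLength value + 6) / 7) : Nat) : Int)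
  pos + nbytes

-- ===== PRECONDITION & SPEC =====
-- Pre_ excludes exactly the inputs on which Python A raises IndexError: some written index
-- pos .. pos+nbytes-1 falls outside the valid (negative indices wrap) range of buf.
def pvNBytes (value : Int) : Nat :=
  max 1 ((PySem.Int.bitLength (PySem.Int.bxor (value <<< (1:Nat)) (value >>> (63:Nat))) + 6) / 7)

def Pre_encode_varint_5 (value : Int) (buf : List Int) (pos : Int) : Prop :=
  -(buf.length : Int) ≤ pos ∧ pos + pvNBytes value ≤ buf.length
instance (value : Int) (buf : List Int) (pos : Int) : Decidable (Pre_encode_varint_5 value buf pos) := by unfold Pre_encode_varint_5; infer_instance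

def pvWitness_encode_varint_5 : Int × List Int × Int := (300, [0, 0, 0], 1)

def Spec_encode_varint_5 (value : Int) (buf : List Int) (pos : Int) (out : Int) : Prop := out = encode_varint_5_alt value buf pos
instance (value : Int) (buf : List Int) (pos : Int) (out : Int) : Decidable (Spec_encode_varint_5 value buf pos out) := by unfold Spec_encode_varint_5; infer_instance

-- ===== CLAIM (what is proved, stated in full; the proofs are below) =====
def Claim_equal_encode_varint_5 : Prop := ∀ (value : Int) (buf : List Int) (pos : Int), Dom_encode_varint_5 value buf pos → Pre_encode_varint_5 value buf pos → Spec_encode_varint_5 value buf pos (encode_varint_5 value buf pos)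

-- ===== LEMMAS AND PROOFS =====


theorem bxor_neg_one (a : Int) : PySem.Int.bxor a (-1) = -a - 1 := by
  simp [PySem.Int.bxor]
  split_ifs <;> omega

theorem bitLength_small (n : Nat) (h : n < 128) : PySem.Int.bitLength (n : Int) ≤ 7 := by
  by_cases h0 : n = 0
  · subst h0; simp [PySem.Int.bitLength_zero]
  · have h1 := PySem.Int.two_pow_bitLength_le (n : Int) (by exact_mod_cast h0)
    rw [Int.natAbs_natCast] at h1
    by_contra hgt
    have : (2:Nat) ^ 7 ≤ 2 ^ (PySem.Int.bitLength (n : Int) - 1) :=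
      Nat.pow_le_pow_right (by norm_num) (by omega)
    omega

theorem bitLength_div128 (n : Nat) (h : 128 ≤ n) :
    PySem.Int.bitLength ((n / 128 : Nat) : Int) + 7 = PySem.Int.bitLength (n : Int) := by
  set s := PySem.Int.bitLength ((n / 128 : Nat) : Int) with hs
  set bl := PySem.Int.bitLength (n : Int) with hbl
  have hq0 : n / 128 ≠ 0 := by omega
  have hu : n / 128 < 2 ^ s := by
    have := PySem.Int.lt_two_pow_bitLength ((n / 128 : Nat) : Int)
    rwa [Int.natAbs_natCast] at this
  have hl : 2 ^ (s - 1) ≤ n / 128 := by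
    have := PySem.Int.two_pow_bitLength_le ((n / 128 : Nat) : Int) (by exact_mod_cast hq0)
    rwa [Int.natAbs_natCast] at this
  have hs1 : 1 ≤ s := by
    by_contra hc
    have : s = 0 := by omega
    rw [this] at hu; simp at hu; omega
  have hnu : n < 2 ^ (s + 7) := by
    have h1 : n < (n / 128 + 1) * 128 := by omega
    have h2 : (n / 128 + 1) * 128 ≤ 2 ^ s * 128 := Nat.mul_le_mul_right _ hu
    have h3 : 2 ^ s * 128 = 2 ^ (s + 7) := by ring
    omega
  have hnl : 2 ^ (s + 6) ≤ n := by
    have h1 : 2 ^ (s - 1) * 128 ≤ n := by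
      calc 2 ^ (s - 1) * 128 ≤ n / 128 * 128 := Nat.mul_le_mul_right _ hl
        _ ≤ n := Nat.div_mul_le_self n 128
    have he : 2 ^ (s - 1) * 128 = 2 ^ (s + 6) := by
      have h2 : s - 1 + 7 = s + 6 := by omega
      rw [← h2, pow_add]; norm_num
    omega
  have hbu : n < 2 ^ bl := by
    have := PySem.Int.lt_two_pow_bitLength (n : Int)
    rwa [Int.natAbs_natCast] at this
  have hbll : 2 ^ (bl - 1) ≤ n := by
    have := PySem.Int.two_pow_bitLength_le (n : Int) (by exact_mod_cast (by omega : n ≠ 0))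
    rwa [Int.natAbs_natCast] at this
  have h1 : s + 6 < bl :=
    (Nat.pow_lt_pow_iff_right (by norm_num)).mp (lt_of_le_of_lt hnl hbu)
  have h2 : bl - 1 < s + 7 :=
    (Nat.pow_lt_pow_iff_right (by norm_num)).mp (lt_of_le_of_lt hbll hnu)
  omega

theorem encLoopA_eq (n : Nat) : ∀ bits pos : Int,
    encLoopA (((n : Int)) >>> (7:Nat)) bits pos
      = pos + (max 1 ((PySem.Int.bitLength (n : Int) + 6) / 7 : Nat) : Nat) := by
  induction n using Nat.strong_induction_on with
  | _ n IH =>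
    intro bits pos
    have hsr : ((n : Int)) >>> (7:Nat) = ((n / 128 : Nat) : Int) := by
      rw [Int.shiftRight_eq_div_pow]
      norm_num [Int.natCast_div]
    rw [hsr, encLoopA]
    by_cases hc : 128 ≤ n
    · have hpos : (0:Int) < ((n / 128 : Nat) : Int) := by
        exact_mod_cast Nat.pos_of_ne_zero (by omega)
      rw [dif_pos hpos, IH (n / 128) (Nat.div_lt_self (by omega) (by norm_num))]
      have hb := bitLength_div128 n hc
      set s := PySem.Int.bitLength ((n / 128 : Nat) : Int)
      have hs1 : 1 ≤ s := by
        by_contra hcc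
        have hs0 : s = 0 := by omega
        have hu : n / 128 < 2 ^ s := by
          have h := PySem.Int.lt_two_pow_bitLength ((n / 128 : Nat) : Int)
          rwa [Int.natAbs_natCast] at h
        rw [hs0] at hu
        simp at hu
        omega
      rw [← hb]
      have hm : max 1 ((s + 6) / 7) + 1 = max 1 ((s + 7 + 6) / 7) := by omega
      push_cast [← hm]
      ring
    · have hz : n / 128 = 0 := by omega
      rw [hz]
      rw [dif_neg (by norm_num)]
      have hsmall := bitLength_small n (by omega)
      have hm : max 1 ((PySem.Int.bitLength (n : Int) + 6) / 7) = 1 := by omega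
      rw [hm]; norm_num

theorem zig_nonneg (value : Int) (h1 : -2147483648 ≤ value) (h2 : value ≤ 2147483648) :
    0 ≤ PySem.Int.bxor (value <<< (1:Nat)) (value >>> (63:Nat)) := by
  rcases le_or_gt 0 value with hv | hv
  · have hs : value >>> (63:Nat) = 0 := by
      rw [Int.shiftRight_eq_div_pow]; norm_num; omega
    rw [hs, PySem.Int.bxor_zero, Int.shiftLeft_eq]
    positivity
  · have hs : value >>> (63:Nat) = -1 := by
      rw [Int.shiftRight_eq_div_pow]; norm_num; omega
    rw [hs, bxor_neg_one, Int.shiftLeft_eq]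
    norm_num
    omega

-- ===== VERDICT (by name: the statement is the Claim_ definition above) =====
theorem encode_varint_5_spec : Claim_equal_encode_varint_5 := by
  intro value buf pos hdom hpre
  have hv : -2147483648 ≤ value ∧ value ≤ 2147483648 := by
    simp [Dom_encode_varint_5, pvDomInt] at hdom
    exact hdom.1.1
  show encode_varint_5 value buf pos = encode_varint_5_alt value buf pos
  simp only [encode_varint_5, encode_varint_5_alt]
  set z := PySem.Int.bxor (value <<< (1:Nat)) (value >>> (63:Nat)) with hzdef
  have hz : 0 ≤ z := zig_nonneg value hv.1 hv.2
  have hzn : z = ((z.toNat : Nat) : Int) := (Int.toNat_of_nonneg hz).symm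
  rw [hzn]
  exact encLoopA_eq z.toNat _ pos
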